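-- pv_equiv track=rewrite | github.com/EndlessReform/2048former | docs/reference-evaluation.py | _encode_cols_from_matrix
-- ===== SOURCE A (Python) =====
-- N = 4
--
-- def _encode_cols_from_matrix(matrix) -> list[int]:
--     keys = []
--     for x in range(N):
--         key = 0
--         for y in range(N):
--             key = key * 32 + int(matrix[y][x])
--         keys.append(key)
--     return keys
-- ===== SOURCE B (Python) =====
-- N = 4
--
-- def _encode_cols_from_matrix(matrix) -> list[int]:
--     # single pass over the first N rows, updating all N column accumulators at once
--     keys = [0] * N
--     for y in range(N):
--         row = matrix[y]
--         keys = [k * 32 + int(row[x]) for x, k in enumerate(keys)]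
--     return keys
-- ===== Notes on version B (the rewrite author's own statement) =====
-- stated objective: alternative
-- what changed: Swapped the loop nesting: instead of computing each column key independently with an inner Horner loop over rows, B makes a single pass over the rows maintaining a vector of all N column accumulators, updating them all at once per row.
import Mathlib
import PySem

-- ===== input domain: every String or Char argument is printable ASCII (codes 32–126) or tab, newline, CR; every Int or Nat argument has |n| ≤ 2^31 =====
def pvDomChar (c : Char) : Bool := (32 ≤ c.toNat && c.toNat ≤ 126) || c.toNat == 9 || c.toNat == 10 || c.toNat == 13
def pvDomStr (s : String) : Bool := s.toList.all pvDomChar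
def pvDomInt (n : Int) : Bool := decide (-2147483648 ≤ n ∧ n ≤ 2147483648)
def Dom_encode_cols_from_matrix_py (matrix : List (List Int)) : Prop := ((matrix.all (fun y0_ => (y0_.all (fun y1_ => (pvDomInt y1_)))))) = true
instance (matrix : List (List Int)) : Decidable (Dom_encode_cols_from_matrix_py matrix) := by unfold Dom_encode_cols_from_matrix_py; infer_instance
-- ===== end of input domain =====

-- B swaps the loop nesting: one pass over the rows maintaining all N column accumulators at once instead of an inner Horner loop per column; alternative decomposition, same cost.


-- ===== PORT A =====
def encode_cols_from_matrix_py (matrix : List (List Int)) : List Int :=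
  (PySem.List.pyRange 0 4 1).foldl (fun keys x =>
    keys ++ [ (PySem.List.pyRange 0 4 1).foldl (fun key y =>
        key * 32 + PySem.List.pyGetD (PySem.List.pyGetD matrix y []) x 0) 0 ]) []

-- ===== PORT B =====
def encode_cols_from_matrix_py_alt (matrix : List (List Int)) : List Int :=
  (PySem.List.pyRange 0 4 1).foldl (fun keys y =>
    let row := PySem.List.pyGetD matrix y []
    (PySem.List.enumerate keys 0).map (fun xk => xk.2 * 32 + PySem.List.pyGetD row xk.1 0))
    [0, 0, 0, 0]

-- ===== PRECONDITION & SPEC =====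
-- Pre_ excludes exactly the inputs where Python A raises IndexError: fewer than 4 rows, or one of the first 4 rows shorter than 4.
def Pre_encode_cols_from_matrix_py (matrix : List (List Int)) : Prop :=
  4 ≤ matrix.length ∧ ∀ row ∈ matrix.take 4, 4 ≤ row.length
instance (matrix : List (List Int)) : Decidable (Pre_encode_cols_from_matrix_py matrix) := by unfold Pre_encode_cols_from_matrix_py; infer_instance
def pvWitness_encode_cols_from_matrix_py : List (List Int) :=
  [[0, 2, 0, 4], [2, 2, 8, 0], [0, 16, 0, 2], [2048, 0, 4, 2]]
def Spec_encode_cols_from_matrix_py (matrix : List (List Int)) (out : List Int) : Prop := out = encode_cols_from_matrix_py_alt matrix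
instance (matrix : List (List Int)) (out : List Int) : Decidable (Spec_encode_cols_from_matrix_py matrix out) := by unfold Spec_encode_cols_from_matrix_py; infer_instance

-- ===== CLAIM =====
def Claim_equal_encode_cols_from_matrix_py : Prop := ∀ (matrix : List (List Int)), Dom_encode_cols_from_matrix_py matrix → Pre_encode_cols_from_matrix_py matrix → Spec_encode_cols_from_matrix_py matrix (encode_cols_from_matrix_py matrix)

-- ===== LEMMAS AND PROOFS =====
theorem pvRange04 : PySem.List.pyRange 0 4 1 = [0, 1, 2, 3] := by decide
theorem gd0 {a : Type} (x : a) (t : List a) (d : a) : PySem.List.pyGetD (x::t) 0 d = x :=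
  PySem.List.pyGetD_zero_cons x t d
theorem gd1 {a : Type} (x y : a) (t : List a) (d : a) : PySem.List.pyGetD (x::y::t) 1 d = y := by
  rw [PySem.List.pyGetD_eq_getElem] <;> simp
theorem gd2 {a : Type} (x y z : a) (t : List a) (d : a) : PySem.List.pyGetD (x::y::z::t) 2 d = z := by
  rw [PySem.List.pyGetD_eq_getElem] <;> simp <;> omega
theorem gd3 {a : Type} (x y z w : a) (t : List a) (d : a) : PySem.List.pyGetD (x::y::z::w::t) 3 d = w := by
  rw [PySem.List.pyGetD_eq_getElem] <;> simp <;> omega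

-- ===== VERDICT =====
theorem encode_cols_from_matrix_py_spec : Claim_equal_encode_cols_from_matrix_py := by
  intro matrix _ hpre
  obtain ⟨hlen, hrows⟩ := hpre
  match matrix, hlen with
  | r0 :: r1 :: r2 :: r3 :: rest, _ =>
    have h0 := hrows r0 (by simp)
    have h1 := hrows r1 (by simp)
    have h2 := hrows r2 (by simp)
    have h3 := hrows r3 (by simp)
    match r0, h0 with
    | a0 :: a1 :: a2 :: a3 :: _, _ =>
    match r1, h1 with
    | b0 :: b1 :: b2 :: b3 :: _, _ =>
    match r2, h2 with
    | c0 :: c1 :: c2 :: c3 :: _, _ =>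
    match r3, h3 with
    | d0 :: d1 :: d2 :: d3 :: _, _ =>
      unfold Spec_encode_cols_from_matrix_py encode_cols_from_matrix_py encode_cols_from_matrix_py_alt
      rw [pvRange04]
      simp only [List.foldl, List.map, PySem.List.enumerate_cons, PySem.List.enumerate_nil,
        gd0, gd1, gd2, gd3, List.nil_append, List.cons_append]
      norm_num [gd0, gd1, gd2, gd3]
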